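-- pv_equiv track=rewrite | github.com/The404Studios/Archimation | ai-control/daemon/trust_translate.py | kernel_to_pe_gate
-- ===== SOURCE A (Python) =====
-- from typing import Final
--
-- KERNEL_SCORE_MIN: Final[int] = -1000
--
-- KERNEL_SCORE_MAX: Final[int] = 1000
--
-- PE_GATE_MIN: Final[int] = 5
--
-- PE_GATE_ANCHORS: Final[dict[int, int]] = {
--     5:   -500,   # public/unsigned PE — anyone load
--     30:    50,   # user-scoped PE
--     60:   400,   # service-scoped PE
--     80:   700,   # admin-scoped PE
--     90:  1000,   # kernel/signed PE
-- }
--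
-- _PE_GATE_SORTED: Final[tuple[int, ...]] = tuple(sorted(PE_GATE_ANCHORS))
--
-- def _clamp(value: int, lo: int, hi: int) -> int:
--     """Clamp an ``int`` into ``[lo, hi]`` inclusive."""
--     if value < lo:
--         return lo
--     if value > hi:
--         return hi
--     return value
--
-- def _require_int(name: str, value: object) -> int:
--     """Reject non-integer inputs with a ``TypeError``.
--
--     Accepts ``bool`` grudgingly (it is an ``int`` subclass in Python) but
--     rejects ``float`` because silent truncation is how Session 41's bugs
--     started in the first place.
--     """
--     if isinstance(value, bool):
--         # bool is int, but we want a clear-cut integer caller.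
--         return int(value)
--     if isinstance(value, int):
--         return value
--     raise TypeError(
--         f"trust_translate: {name!r} must be int, got {type(value).__name__}"
--     )
--
-- def kernel_to_pe_gate(score: int) -> int:
--     """Inverse of ``pe_gate_to_kernel`` — return the highest PE gate
--     whose floor ``<= score``.  Lossy because PE gates are discrete.
--     """
--     s = _require_int("score", score)
--     s = _clamp(s, KERNEL_SCORE_MIN, KERNEL_SCORE_MAX)
--     best = PE_GATE_MIN
--     for a in _PE_GATE_SORTED:
--         if PE_GATE_ANCHORS[a] <= s:
--             best = a
--         else:
--             break
--     return best
-- ===== SOURCE B (Python) =====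
-- from typing import Final
--
-- KERNEL_SCORE_MIN: Final[int] = -1000
-- KERNEL_SCORE_MAX: Final[int] = 1000
-- PE_GATE_MIN: Final[int] = 5
--
-- # floors in ascending order and the matching gates, as parallel tables
-- _FLOORS: Final[tuple[int, ...]] = (-500, 50, 400, 700, 1000)
-- _GATES: Final[tuple[int, ...]] = (5, 30, 60, 80, 90)
--
--
-- def _require_int(name: str, value: object) -> int:
--     if isinstance(value, bool):
--         return int(value)
--     if isinstance(value, int):
--         return value
--     raise TypeError(
--         f"trust_translate: {name!r} must be int, got {type(value).__name__}"
--     )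
--
--
-- def kernel_to_pe_gate(score: int) -> int:
--     """Return the highest PE gate whose floor <= score, by binary search."""
--     s = _require_int("score", score)
--     if s < KERNEL_SCORE_MIN:
--         s = KERNEL_SCORE_MIN
--     elif s > KERNEL_SCORE_MAX:
--         s = KERNEL_SCORE_MAX
--     # bisect_right(_FLOORS, s), hand-written (A imports no bisect module)
--     lo, hi = 0, len(_FLOORS)
--     while lo < hi:
--         mid = (lo + hi) // 2
--         if _FLOORS[mid] <= s:
--             lo = mid + 1
--         else:
--             hi = mid
--     return _GATES[lo - 1] if lo else PE_GATE_MIN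
-- ===== Notes on version B (the rewrite author's own statement) =====
-- stated objective: idiomatic
-- what changed: Replaces the linear scan over the sorted anchor-dict keys (with break) by a hand-written bisect_right binary search into a precomputed ascending floor table paired with a parallel gate table.
import Mathlib
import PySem

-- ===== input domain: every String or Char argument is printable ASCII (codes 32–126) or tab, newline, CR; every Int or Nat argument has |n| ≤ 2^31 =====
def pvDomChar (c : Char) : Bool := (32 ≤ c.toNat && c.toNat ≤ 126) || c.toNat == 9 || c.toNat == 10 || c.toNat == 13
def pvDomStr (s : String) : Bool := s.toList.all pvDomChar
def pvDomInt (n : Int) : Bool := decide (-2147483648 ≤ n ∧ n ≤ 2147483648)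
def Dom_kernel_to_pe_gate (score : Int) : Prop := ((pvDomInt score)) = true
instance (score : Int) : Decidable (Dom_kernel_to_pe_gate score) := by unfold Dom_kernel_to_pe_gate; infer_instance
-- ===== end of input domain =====

-- B replaces A's linear scan over the anchor dict by a binary search into a
-- parallel floor/gate table (same values everywhere; objective: idiomatic).

-- ===== PORT A =====
-- PE_GATE_ANCHORS as an insertion-ordered dict
def pvAnchors : PySem.Dict Int Int :=
  PySem.Dict.ofList [(5, -500), (30, 50), (60, 400), (80, 700), (90, 1000)]

-- _PE_GATE_SORTED = tuple(sorted(PE_GATE_ANCHORS))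
def pvGateSorted : List Int := PySem.List.sorted (PySem.Dict.keys pvAnchors) id

-- _clamp
def pvClampA (value lo hi : Int) : Int :=
  if value < lo then lo else if value > hi then hi else value

-- the for-loop with break; dict lookup is exact (all keys present, getD default never used)
def pvLoopA : List Int → Int → Int → Int
  | [], _, best => best
  | a :: rest, s, best =>
    if PySem.Dict.getD pvAnchors a 0 ≤ s then pvLoopA rest s a else best

def kernel_to_pe_gate (score : Int) : Int :=
  -- _require_int: score is already an int here
  let s := pvClampA score (-1000) 1000
  pvLoopA pvGateSorted s 5

-- ===== PORT B =====
def pvFloors : List Int := [-500, 50, 400, 700, 1000]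
def pvGates : List Int := [5, 30, 60, 80, 90]

-- the hand-written bisect_right while-loop; fuel bounds the iterations (hi - lo
-- shrinks each step, so fuel = 5 is never exhausted); list indexing is exact
-- (mid < len(_FLOORS) always, getD default never used); (lo + hi) // 2 on the
-- nonnegative lo, hi is exactly Nat division
def pvBisectB (s : Int) : Nat → Nat → Nat → Nat
  | 0, lo, _ => lo
  | fuel + 1, lo, hi =>
    if lo < hi then
      let mid := (lo + hi) / 2
      if pvFloors.getD mid 0 ≤ s then pvBisectB s fuel (mid + 1) hi
      else pvBisectB s fuel lo mid
    else lo

def kernel_to_pe_gate_alt (score : Int) : Int :=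
  let s := if score < -1000 then -1000 else if score > 1000 then 1000 else score
  let lo := pvBisectB s 5 0 5
  if lo ≠ 0 then pvGates.getD (lo - 1) 5 else 5

-- ===== PRECONDITION & SPEC =====
def Spec_kernel_to_pe_gate (score : Int) (out : Int) : Prop := out = kernel_to_pe_gate_alt score
instance (score : Int) (out : Int) : Decidable (Spec_kernel_to_pe_gate score out) := by unfold Spec_kernel_to_pe_gate; infer_instance

-- ===== CLAIM (what is proved, stated in full; the proofs are below) =====
def Claim_equal_kernel_to_pe_gate : Prop := ∀ (score : Int), Dom_kernel_to_pe_gate score → Spec_kernel_to_pe_gate score (kernel_to_pe_gate score)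

-- ===== LEMMAS AND PROOFS =====
theorem pvGateSorted_eval : pvGateSorted = [5, 30, 60, 80, 90] := by decide

theorem pvLoopA_eval (s : Int) : pvLoopA [5, 30, 60, 80, 90] s 5 =
    if 1000 ≤ s then 90 else if 700 ≤ s then 80 else if 400 ≤ s then 60
    else if 50 ≤ s then 30 else 5 := by
  have h5 : PySem.Dict.getD pvAnchors 5 0 = -500 := by decide
  have h30 : PySem.Dict.getD pvAnchors 30 0 = 50 := by decide
  have h60 : PySem.Dict.getD pvAnchors 60 0 = 400 := by decide
  have h80 : PySem.Dict.getD pvAnchors 80 0 = 700 := by decide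
  have h90 : PySem.Dict.getD pvAnchors 90 0 = 1000 := by decide
  norm_num [pvLoopA, h5, h30, h60, h80, h90]
  split_ifs <;> omega

theorem pvBisectB_eval (s : Int) : pvBisectB s 5 0 5 =
    if 1000 ≤ s then 5 else if 700 ≤ s then 4 else if 400 ≤ s then 3
    else if 50 ≤ s then 2 else if -500 ≤ s then 1 else 0 := by
  norm_num [pvBisectB, pvFloors]
  split_ifs <;> omega

-- ===== VERDICT (by name: the statement is the Claim_ definition above) =====
theorem kernel_to_pe_gate_spec : Claim_equal_kernel_to_pe_gate := by
  intro score _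
  unfold Spec_kernel_to_pe_gate kernel_to_pe_gate kernel_to_pe_gate_alt
  rw [pvGateSorted_eval]
  norm_num [pvLoopA_eval, pvBisectB_eval, pvClampA, pvGates]
  split_ifs <;> first | rfl | omega | (norm_num; omega)
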